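-- pv_equiv track=rewrite | github.com/Chethan1710/incident-triage-env | app.py | causal_path
-- ===== SOURCE A (Python) =====
-- def causal_path(root, deps):
--     path = []
--     def dfs(node, visited):
--         path.append(node)
--         visited.add(node)
--         for svc, d in deps.items():
--             if node in d and svc not in visited:
--                 dfs(svc, visited)
--     dfs(root, set())
--     return path
-- ===== SOURCE B (Python) =====
-- def causal_path(root, deps):
--     # Precompute a reverse-dependency adjacency map once (deps order, each
--     # dependency list deduplicated), then a functional DFS that returns each
--     # subtree's path by concatenating child results.
--     rev = {}
--     for svc, d in deps.items():
--         for x in dict.fromkeys(d):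
--             rev.setdefault(x, []).append(svc)
--
--     def dfs(node, visited):
--         visited.add(node)
--         out = [node]
--         for svc in rev.get(node, []):
--             if svc not in visited:
--                 out += dfs(svc, visited)
--         return out
--
--     return dfs(root, set())
-- ===== Notes on version B (the rewrite author's own statement) =====
-- stated objective: alternative
-- what changed: B precomputes a reverse-dependency adjacency map in one pass over deps and then runs a functional DFS over adjacency lists that returns each subtree's path (concatenating child results and threading the visited set), instead of A's rescan of the entire deps dict at every visited node with a shared output accumulator.
import Mathlib
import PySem

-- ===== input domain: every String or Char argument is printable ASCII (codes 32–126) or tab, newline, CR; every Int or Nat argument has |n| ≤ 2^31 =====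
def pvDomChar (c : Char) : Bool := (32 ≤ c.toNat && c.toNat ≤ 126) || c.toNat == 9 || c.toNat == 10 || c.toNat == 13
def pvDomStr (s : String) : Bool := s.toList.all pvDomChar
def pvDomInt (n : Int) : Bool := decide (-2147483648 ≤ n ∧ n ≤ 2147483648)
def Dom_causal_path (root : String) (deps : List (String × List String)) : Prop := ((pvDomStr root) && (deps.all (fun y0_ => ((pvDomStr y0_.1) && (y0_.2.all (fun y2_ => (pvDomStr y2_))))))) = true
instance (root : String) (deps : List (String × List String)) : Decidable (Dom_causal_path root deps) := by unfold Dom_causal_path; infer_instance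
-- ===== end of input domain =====

-- B precomputes a reverse-dependency adjacency map once and runs a functional DFS over it
-- that returns each subtree's path, replacing A's full scan of deps at every visited node
-- (objective: alternative algorithm/decomposition).


-- ===== PORT A =====
-- A's recursive dfs: appends node to the shared path, marks visited, scans ALL of deps
-- for services depending on node, recursing on unvisited ones.  Fuel (deps.length + 1)
-- only makes the recursion structural: each recursive call is on an unvisited key of
-- deps, so the Python recursion depth is at most deps.length + 1 and the fuel is never
-- exhausted.
def dfsA (deps : List (String × List String)) :
    Nat → String → List String × PySem.Set String → List String × PySem.Set String
  | 0, _, st => st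
  | fuel+1, node, st =>
    deps.foldl
      (fun st p =>
        if p.2.contains node && !(PySem.Set.contains st.2 p.1) then dfsA deps fuel p.1 st
        else st)
      (st.1 ++ [node], PySem.Set.add st.2 node)

def causal_path (root : String) (deps : List (String × List String)) : List String :=
  (dfsA deps (deps.length + 1) root ([], PySem.Set.empty)).1

-- ===== PORT B =====
-- rev.setdefault(x, []).append(svc) == rev[x] = rev.get(x, []) + [svc] == Dict.modify;
-- dict.fromkeys(d) == PySem.List.dedup d
def buildRev (deps : List (String × List String)) : PySem.Dict String (List String) :=
  deps.foldl
    (fun r p => (PySem.List.dedup p.2).foldl (fun r x => r.modify x [] (· ++ [p.1])) r)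
    PySem.Dict.empty

-- B's dfs: returns the subtree path ([node] ++ concatenated child results) and threads
-- the visited set (the Python set is mutated in place; threading it is the same values).
-- Same fuel bound as A: recursion only enters unvisited nodes.
def dfsB (rev : PySem.Dict String (List String)) :
    Nat → String → PySem.Set String → List String × PySem.Set String
  | 0, _, vis => ([], vis)
  | fuel+1, node, vis =>
    (rev.getD node []).foldl
      (fun acc svc =>
        if !(PySem.Set.contains acc.2 svc) then
          let r := dfsB rev fuel svc acc.2
          (acc.1 ++ r.1, r.2)
        else acc)
      ([node], PySem.Set.add vis node)

def causal_path_alt (root : String) (deps : List (String × List String)) : List String :=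
  (dfsB (buildRev deps) (deps.length + 1) root PySem.Set.empty).1

-- ===== PRECONDITION & SPEC =====
def Spec_causal_path (root : String) (deps : List (String × List String)) (out : List String) : Prop := out = causal_path_alt root deps
instance (root : String) (deps : List (String × List String)) (out : List String) : Decidable (Spec_causal_path root deps out) := by unfold Spec_causal_path; infer_instance

-- ===== CLAIM (what is proved, stated in full; the proofs are below) =====
def Claim_equal_causal_path : Prop := ∀ (root : String) (deps : List (String × List String)), Dom_causal_path root deps → Spec_causal_path root deps (causal_path root deps)

-- ===== LEMMAS AND PROOFS =====

-- the nested build loop over deps = single loop over the flattened (node, svc) pair list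
theorem buildRev_flatten : ∀ (l : List (String × List String)) (r : PySem.Dict String (List String)),
    l.foldl (fun r p => (PySem.List.dedup p.2).foldl (fun r x => r.modify x [] (· ++ [p.1])) r) r
      = (l.flatMap (fun p => (PySem.List.dedup p.2).map (fun y => (y, p.1)))).foldl
          (fun d q => d.modify q.1 [] (· ++ [q.2])) r := by
  intro l
  induction l with
  | nil => intro r; rfl
  | cons p t ih =>
    intro r
    rw [List.foldl_cons, List.flatMap_cons, List.foldl_append, ih, List.foldl_map]

-- one dedup'd dependency list contributes svc exactly when x is among the deps
theorem filter_map_pair (l : List String) (hl : l.Nodup) (x svc : String) :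
    (((l.map (fun y => (y, svc))).filter (fun q => q.1 == x)).map (fun q => q.2))
      = if x ∈ l then [svc] else [] := by
  induction l with
  | nil => simp
  | cons a t ih =>
    rcases List.nodup_cons.mp hl with ⟨ha, ht⟩
    by_cases hax : a = x
    · subst hax
      simp [ih ht, ha]
    · have hb : ((a, svc).1 == x) = false := by simpa using hax
      simp [hb, ih ht, Ne.symm hax]

-- flattened pairs filtered at x = A's inner-scan hit sequence at x
theorem flat_filter (x : String) : ∀ (t : List (String × List String)),
    (((t.flatMap (fun p => (PySem.List.dedup p.2).map (fun y => (y, p.1)))).filter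
        (fun q => q.1 == x)).map (fun q => q.2))
      = (t.filter (fun p => p.2.contains x)).map Prod.fst := by
  intro t
  induction t with
  | nil => rfl
  | cons p t ih =>
    rw [List.flatMap_cons, List.filter_append, List.map_append, ih, List.filter_cons,
      filter_map_pair (PySem.List.dedup p.2) (PySem.List.nodup_dedup p.2) x p.1]
    by_cases hx : x ∈ p.2
    · have hc : p.2.contains x = true := by simpa using hx
      have hd : x ∈ PySem.List.dedup p.2 := (PySem.List.mem_dedup p.2 x).mpr hx
      rw [if_pos hd, hc, if_pos rfl, List.map_cons]
      rfl
    · have hc : p.2.contains x = false := by simpa using hx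
      have hd : x ∉ PySem.List.dedup p.2 := fun h => hx ((PySem.List.mem_dedup p.2 x).mp h)
      rw [if_neg hd, hc, if_neg (by simp), List.nil_append]

-- the adjacency list for x in buildRev is exactly A's inner-scan hit sequence
theorem buildRev_getD (deps : List (String × List String)) (x : String) :
    (buildRev deps).getD x []
      = ((deps.filter (fun p => p.2.contains x)).map Prod.fst) := by
  unfold buildRev
  rw [buildRev_flatten, PySem.Dict.getD_foldl_modify_append, PySem.Dict.getD_empty,
    List.nil_append, flat_filter]

-- a guarded fold over pairs = fold over the filtered first components
theorem foldl_filter_fst {α β γ : Type} (l : List (α × β)) (P : α × β → Bool)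
    (f : γ → α → γ) (b : γ) :
    l.foldl (fun st p => if P p then f st p.1 else st) b
      = ((l.filter P).map Prod.fst).foldl f b := by
  induction l generalizing b with
  | nil => rfl
  | cons p t ih =>
    by_cases hp : P p = true
    · simp only [List.foldl_cons, List.filter_cons, hp, if_true, List.map_cons, ih]
    · simp only [List.foldl_cons, List.filter_cons, hp, Bool.false_eq_true, if_false, ih]

-- A's child loop over a state (path, visited) = B's child loop over ([], visited)
-- with the path prefix p factored out, given the fuel induction hypothesis
theorem foldl_shift (deps : List (String × List String)) (n : Nat)
    (ih : ∀ (node : String) (p : List String) (v : PySem.Set String),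
      dfsA deps n node (p, v)
        = (p ++ (dfsB (buildRev deps) n node v).1, (dfsB (buildRev deps) n node v).2)) :
    ∀ (l : List String) (p a : List String) (s : PySem.Set String),
      l.foldl
          (fun st svc => if !(PySem.Set.contains st.2 svc) then dfsA deps n svc st else st)
          (p ++ a, s)
        = (p ++ (l.foldl
              (fun acc svc =>
                if !(PySem.Set.contains acc.2 svc) then
                  let r := dfsB (buildRev deps) n svc acc.2
                  (acc.1 ++ r.1, r.2)
                else acc)
              (a, s)).1,
           (l.foldl
              (fun acc svc =>
                if !(PySem.Set.contains acc.2 svc) then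
                  let r := dfsB (buildRev deps) n svc acc.2
                  (acc.1 ++ r.1, r.2)
                else acc)
              (a, s)).2) := by
  intro l
  induction l with
  | nil => intro p a s; rfl
  | cons x t iht =>
    intro p a s
    by_cases hx : PySem.Set.contains s x = true
    · simp only [List.foldl_cons, hx, Bool.not_true, Bool.false_eq_true, if_false]
      exact iht p a s
    · have hx' : PySem.Set.contains s x = false := by simpa using hx
      simp only [List.foldl_cons, hx', Bool.not_false, if_true, ih x (p ++ a) s,
        List.append_assoc]
      exact iht p (a ++ (dfsB (buildRev deps) n x s).1) (dfsB (buildRev deps) n x s).2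

-- the two DFS computations agree, for every fuel: A's result is the prefix path plus
-- B's subtree path, with the same visited set
theorem dfsA_eq_dfsB (deps : List (String × List String)) :
    ∀ (fuel : Nat) (node : String) (p : List String) (v : PySem.Set String),
      dfsA deps fuel node (p, v)
        = (p ++ (dfsB (buildRev deps) fuel node v).1,
           (dfsB (buildRev deps) fuel node v).2) := by
  intro fuel
  induction fuel with
  | zero => intro node p v; simp [dfsA, dfsB]
  | succ n ih =>
    intro node p v
    show deps.foldl _ _ = _
    have hstep :
        (fun (st : List String × PySem.Set String) (p : String × List String) =>
            if p.2.contains node && !(PySem.Set.contains st.2 p.1) then dfsA deps n p.1 st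
            else st)
          = (fun st p =>
              if p.2.contains node then
                (fun (st : List String × PySem.Set String) (svc : String) =>
                  if !(PySem.Set.contains st.2 svc) then dfsA deps n svc st else st)
                  st p.1
              else st) := by
      funext st p
      by_cases h1 : p.2.contains node = true <;>
        by_cases h2 : (!(PySem.Set.contains st.2 p.1)) = true <;>
          simp only [h1, h2, Bool.and_true, Bool.and_false, Bool.false_eq_true,
            if_false, if_true]
    rw [hstep]
    refine (foldl_filter_fst deps (fun p => p.2.contains node)
        (fun (st : List String × PySem.Set String) (svc : String) =>
          if !(PySem.Set.contains st.2 svc) then dfsA deps n svc st else st)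
        (p ++ [node], PySem.Set.add v node)).trans ?_
    rw [← buildRev_getD]
    exact foldl_shift deps n ih ((buildRev deps).getD node []) p [node] (PySem.Set.add v node)

-- ===== VERDICT (by name: the statement is the Claim_ definition above) =====
theorem causal_path_spec : Claim_equal_causal_path := by
  intro root deps _
  show causal_path root deps = causal_path_alt root deps
  unfold causal_path causal_path_alt
  rw [dfsA_eq_dfsB]
  simp
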